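-- pv_equiv track=rewrite | github.com/wangyendt/wekws | tools/dump_hifi4_quant_dtypes.py | _summary_dtypes
-- ===== SOURCE A (Python) =====
-- from collections import Counter, defaultdict
-- from typing import Any, Dict, List, Optional, Tuple
--
-- def _summary_dtypes(entries: List[Dict[str, Any]], key: str) -> Dict[str, Dict[str, int]]:
--     out = defaultdict(lambda: {"tensors": 0, "numel": 0})
--     for e in entries:
--         dtype = e.get(key)
--         numel = e.get("quant_numel")
--         if dtype is None:
--             continue
--         out[dtype]["tensors"] += 1
--         out[dtype]["numel"] += int(numel) if numel is not None else 0
--     return dict(sorted(out.items()))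
-- ===== SOURCE B (Python) =====
-- def _summary_dtypes(entries, key):
--     # Collect (dtype, numel) pairs, sort them by dtype, then sum each
--     # contiguous run of equal dtypes in a single linear scan: the result
--     # dict is built directly in ascending key order, no final sort needed.
--     pairs = sorted(
--         ((e[key], int(e["quant_numel"]) if e.get("quant_numel") is not None else 0)
--          for e in entries if e.get(key) is not None),
--         key=lambda p: p[0],
--     )
--     res = {}
--     i = 0
--     while i < len(pairs):
--         d = pairs[i][0]
--         j = i
--         total = 0
--         while j < len(pairs) and pairs[j][0] == d:
--             total += pairs[j][1]
--             j += 1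
--         res[d] = {"tensors": j - i, "numel": total}
--         i = j
--     return res
-- ===== Notes on version B (the rewrite author's own statement) =====
-- stated objective: alternative
-- what changed: A accumulates counts/sums in a defaultdict while scanning and sorts the items at the end; B first extracts (dtype, numel) pairs, sorts them by dtype, and builds the result by summing each contiguous run in one linear scan, so the dict is produced already in key order.
import Mathlib
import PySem

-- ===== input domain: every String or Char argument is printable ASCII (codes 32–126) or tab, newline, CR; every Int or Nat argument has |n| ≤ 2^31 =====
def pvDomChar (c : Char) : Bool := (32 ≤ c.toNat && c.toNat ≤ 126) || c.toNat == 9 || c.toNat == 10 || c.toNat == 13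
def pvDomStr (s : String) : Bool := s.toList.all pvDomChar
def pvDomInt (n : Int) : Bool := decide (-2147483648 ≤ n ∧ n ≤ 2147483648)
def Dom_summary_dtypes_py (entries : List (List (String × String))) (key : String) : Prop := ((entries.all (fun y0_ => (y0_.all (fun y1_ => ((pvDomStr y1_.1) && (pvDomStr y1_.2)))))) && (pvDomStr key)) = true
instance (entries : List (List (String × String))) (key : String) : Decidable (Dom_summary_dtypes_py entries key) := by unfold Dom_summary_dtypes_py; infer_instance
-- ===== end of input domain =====

-- B replaces A's defaultdict accumulation + final sort by sort-the-pairs-then-sum-each-run (alternative decomposition, similar cost).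

-- shared helper: the value of `int(e.get("quant_numel")) if e.get("quant_numel") is not None else 0`
-- (the identical subexpression occurs in both Pythons); under Pre_ the `.getD 0` default is never reached,
-- since Pre_ excludes the inputs where Python's int() raises ValueError.
def pvNumel (e : List (String × String)) : Int :=
  match (PySem.Dict.ofList e).get? "quant_numel" with
  | some s => (PySem.Int.ofStr? s).getD 0
  | none => 0

-- ===== PORT A =====
-- the defaultdict's default factory {"tensors": 0, "numel": 0}
def pvInnerD0 : PySem.Dict String Int := PySem.Dict.ofList [("tensors", 0), ("numel", 0)]

def summary_dtypes_py (entries : List (List (String × String))) (key : String) :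
    List (String × List (String × Int)) :=
  let out := entries.foldl (fun out e =>
    match (PySem.Dict.ofList e).get? key with
    | none => out           -- dtype is None: continue
    | some dtype =>         -- out[dtype]["tensors"] += 1; out[dtype]["numel"] += int(numel) if ... else 0
        (out.modify dtype pvInnerD0 (fun v => v.modify "tensors" 0 (· + 1))).modify
          dtype pvInnerD0 (fun v => v.modify "numel" 0 (· + pvNumel e))) PySem.Dict.empty
  -- dict(sorted(out.items())): the keys are distinct, so Python's tuple sort orders by the key alone
  (PySem.List.sorted out.items (fun p => p.1)).map (fun p => (p.1, p.2.items))

-- ===== PORT B =====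
-- pairs = sorted(((e[key], int(...)) for e in entries if e.get(key) is not None), key=lambda p: p[0])
def pvPairs (entries : List (List (String × String))) (key : String) : List (String × Int) :=
  entries.filterMap (fun e => ((PySem.Dict.ofList e).get? key).map (fun d => (d, pvNumel e)))

-- the while-loop over `pairs`: one result row per contiguous run of equal dtypes
def pvGroup : List (String × Int) → List (String × List (String × Int))
  | [] => []
  | p :: rest =>
      (p.1, [("tensors", (1 + (rest.takeWhile (fun q => q.1 == p.1)).length : Int)),
             ("numel", p.2 + ((rest.takeWhile (fun q => q.1 == p.1)).map (·.2)).sum)])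
        :: pvGroup (rest.dropWhile (fun q => q.1 == p.1))
termination_by l => l.length
decreasing_by simpa using Nat.lt_succ_of_le (List.length_dropWhile_le _ _)

def summary_dtypes_py_alt (entries : List (List (String × String))) (key : String) :
    List (String × List (String × Int)) :=
  pvGroup (PySem.List.sorted (pvPairs entries key) (fun p => p.1))

-- ===== PRECONDITION & SPEC =====
-- Pre_ excludes exactly the inputs where Python's int() raises ValueError: an entry whose dtype is
-- present and whose "quant_numel" value is a string int() cannot parse.
def Pre_summary_dtypes_py (entries : List (List (String × String))) (key : String) : Prop :=
  ∀ e ∈ entries, ((PySem.Dict.ofList e).get? key).isSome = true →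
    (((PySem.Dict.ofList e).get? "quant_numel").all (fun s => (PySem.Int.ofStr? s).isSome)) = true
instance (entries : List (List (String × String))) (key : String) : Decidable (Pre_summary_dtypes_py entries key) := by unfold Pre_summary_dtypes_py; infer_instance

def pvWitness_summary_dtypes_py : (List (List (String × String))) × String :=
  ([[("dtype", "int8"), ("quant_numel", "4")], [("dtype", "fp32")]], "dtype")

def Spec_summary_dtypes_py (entries : List (List (String × String))) (key : String) (out : List (String × List (String × Int))) : Prop := out = summary_dtypes_py_alt entries key
instance (entries : List (List (String × String))) (key : String) (out : List (String × List (String × Int))) : Decidable (Spec_summary_dtypes_py entries key out) := by unfold Spec_summary_dtypes_py; infer_instance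

-- ===== CLAIM (what is proved, stated in full; the proofs are below) =====
def Claim_equal_summary_dtypes_py : Prop := ∀ (entries : List (List (String × String))) (key : String), Dom_summary_dtypes_py entries key → Pre_summary_dtypes_py entries key → Spec_summary_dtypes_py entries key (summary_dtypes_py entries key)

-- ===== LEMMAS AND PROOFS =====

-- proof-side helpers
def pvIStep (n : Int) (v : PySem.Dict String Int) : PySem.Dict String Int :=
  (v.modify "tensors" 0 (· + 1)).modify "numel" 0 (· + n)

def pvStep (out : PySem.Dict String (PySem.Dict String Int)) (p : String × Int) :
    PySem.Dict String (PySem.Dict String Int) :=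
  out.modify p.1 pvInnerD0 (pvIStep p.2)

def pvInner (c s : Int) : PySem.Dict String Int := PySem.Dict.mk [("tensors", c), ("numel", s)]

def pvKeys : List (String × Int) → List String
  | [] => []
  | p :: rest => p.1 :: pvKeys (rest.dropWhile (fun q => q.1 == p.1))
termination_by l => l.length
decreasing_by simpa using Nat.lt_succ_of_le (List.length_dropWhile_le _ _)

theorem pv_modify_modify_self {κ ν : Type} [BEq κ] [LawfulBEq κ] (d : PySem.Dict κ ν)
    (k : κ) (d0 : ν) (f g : ν → ν) :
    (d.modify k d0 f).modify k d0 g = d.modify k d0 (fun v => g (f v)) := by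
  conv_lhs => rw [PySem.Dict.modify.eq_1]
  rw [PySem.Dict.getD_modify_self, PySem.Dict.modify.eq_1 d k d0 f,
    PySem.Dict.insert_insert_self, PySem.Dict.modify.eq_1 d k d0 (fun v => g (f v))]

theorem pv_foldA_eq (entries : List (List (String × String))) (key : String)
    (d : PySem.Dict String (PySem.Dict String Int)) :
    entries.foldl (fun out e =>
      match (PySem.Dict.ofList e).get? key with
      | none => out
      | some dtype =>
          (out.modify dtype pvInnerD0 (fun v => v.modify "tensors" 0 (· + 1))).modify
            dtype pvInnerD0 (fun v => v.modify "numel" 0 (· + pvNumel e))) d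
      = (pvPairs entries key).foldl pvStep d := by
  induction entries generalizing d with
  | nil => rfl
  | cons e es ih =>
    cases h : (PySem.Dict.ofList e).get? key with
    | none =>
      simp only [pvPairs, List.filterMap_cons, h, List.foldl_cons]
      exact ih d
    | some dt =>
      simp only [pvPairs, List.filterMap_cons, h, Option.map_some, List.foldl_cons]
      rw [pv_modify_modify_self]
      exact ih _

theorem pv_getD_fold (l : List (String × Int)) (d : PySem.Dict String (PySem.Dict String Int))
    (k : String) :
    (l.foldl pvStep d).getD k pvInnerD0
      = (l.filter (fun p => p.1 == k)).foldl (fun v p => pvIStep p.2 v) (d.getD k pvInnerD0) := by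
  induction l generalizing d with
  | nil => rfl
  | cons p l ih =>
    rw [List.foldl_cons, ih, List.filter_cons]
    by_cases h : p.1 = k
    · subst h
      simp only [BEq.rfl, if_pos, List.foldl_cons]
      rw [show pvStep d p = d.modify p.1 pvInnerD0 (pvIStep p.2) from rfl,
        PySem.Dict.getD_modify_self]
    · have hne : k ≠ p.1 := fun hh => h hh.symm
      simp only [beq_iff_eq, h, ite_false]
      rw [show pvStep d p = d.modify p.1 pvInnerD0 (pvIStep p.2) from rfl,
        PySem.Dict.getD_modify_of_ne _ _ _ hne]

theorem pv_istep_inner (n a b : Int) : pvIStep n (pvInner a b) = pvInner (a + 1) (b + n) := by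
  rfl

theorem pv_innerD0_eq : pvInnerD0 = pvInner 0 0 := by
  apply PySem.Dict.ext; rfl

theorem pv_inner_fold (l : List (String × Int)) (a b : Int) :
    l.foldl (fun v p => pvIStep p.2 v) (pvInner a b)
      = pvInner (a + l.length) (b + (l.map (·.2)).sum) := by
  induction l generalizing a b with
  | nil => simp
  | cons p l ih =>
    rw [List.foldl_cons, pv_istep_inner, ih]
    simp only [pvInner, PySem.Dict.mk.injEq, List.cons.injEq, Prod.mk.injEq,
      List.length_cons, List.map_cons, List.sum_cons, true_and, and_true]
    refine ⟨by push_cast; ring, by ring⟩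

-- run decomposition of a list sorted by key
theorem pv_drop_lt (c : String) (rest : List (String × Int))
    (hle : ∀ x ∈ rest, c ≤ x.1)
    (hp : List.Pairwise (fun a b => a.1 ≤ b.1) rest) :
    ∀ x ∈ rest.dropWhile (fun q => q.1 == c), c < x.1 := by
  induction rest with
  | nil => simp
  | cons r rs ih =>
    rw [List.pairwise_cons] at hp
    rw [List.dropWhile_cons]
    by_cases h : r.1 = c
    · simp only [h, BEq.rfl, if_pos]
      exact ih (fun x hx => hle x (List.mem_cons_of_mem _ hx)) hp.2
    · simp only [beq_iff_eq, h, ite_false]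
      intro x hx
      rcases List.mem_cons.mp hx with rfl | hx
      · exact lt_of_le_of_ne (hle x (List.mem_cons_self)) (fun hh => h hh.symm)
      · exact lt_of_lt_of_le
          (lt_of_le_of_ne (hle r List.mem_cons_self) (fun hh => h hh.symm)) (hp.1 x hx)

theorem pv_run_facts (p : String × Int) (rest : List (String × Int))
    (hq : List.Pairwise (fun a b => a.1 ≤ b.1) (p :: rest)) :
    (∀ x ∈ rest.takeWhile (fun q => q.1 == p.1), x.1 = p.1) ∧
    (∀ x ∈ rest.dropWhile (fun q => q.1 == p.1), p.1 < x.1) ∧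
    List.Pairwise (fun a b => a.1 ≤ b.1) (rest.dropWhile (fun q => q.1 == p.1)) := by
  rw [List.pairwise_cons] at hq
  refine ⟨?_, pv_drop_lt p.1 rest hq.1 hq.2, hq.2.sublist (List.dropWhile_sublist _)⟩
  intro x hx
  have h := List.mem_takeWhile_imp hx
  simpa using h

theorem pv_keys_mem (q : List (String × Int))
    (hq : List.Pairwise (fun a b => a.1 ≤ b.1) q) (k : String) :
    k ∈ pvKeys q ↔ k ∈ q.map (·.1) := by
  induction q using pvKeys.induct with
  | case1 => simp [pvKeys]
  | case2 p rest ih =>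
    obtain ⟨htake, hdrop, hdpw⟩ := pv_run_facts p rest hq
    rw [show pvKeys (p :: rest) = p.1 :: pvKeys (rest.dropWhile (fun q => q.1 == p.1)) from by
      rw [pvKeys]]
    have hsplit : rest = rest.takeWhile (fun q => q.1 == p.1) ++ rest.dropWhile (fun q => q.1 == p.1) :=
      (List.takeWhile_append_dropWhile).symm
    constructor
    · intro hk
      rcases List.mem_cons.mp hk with rfl | hk
      · simp
      · have := (ih hdpw).mp hk
        rcases List.mem_map.mp this with ⟨x, hx, rfl⟩
        exact List.mem_map.mpr ⟨x, List.mem_cons_of_mem _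
          ((List.Sublist.mem · (List.dropWhile_sublist _)) hx), rfl⟩
    · intro hk
      rcases List.mem_map.mp hk with ⟨x, hx, rfl⟩
      rcases List.mem_cons.mp hx with rfl | hx
      · exact List.mem_cons_self
      · rw [hsplit] at hx
        rcases List.mem_append.mp hx with hx | hx
        · simp [htake x hx]
        · exact List.mem_cons_of_mem _ ((ih hdpw).mpr (List.mem_map.mpr ⟨x, hx, rfl⟩))

theorem pv_keys_lt (q : List (String × Int))
    (hq : List.Pairwise (fun a b => a.1 ≤ b.1) q) :
    List.Pairwise (· < ·) (pvKeys q) := by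
  induction q using pvKeys.induct with
  | case1 => simp [pvKeys]
  | case2 p rest ih =>
    obtain ⟨htake, hdrop, hdpw⟩ := pv_run_facts p rest hq
    rw [show pvKeys (p :: rest) = p.1 :: pvKeys (rest.dropWhile (fun q => q.1 == p.1)) from by
      rw [pvKeys]]
    refine List.pairwise_cons.mpr ⟨fun k hk => ?_, ih hdpw⟩
    rcases List.mem_map.mp ((pv_keys_mem _ hdpw k).mp hk) with ⟨x, hx, rfl⟩
    exact hdrop x hx

theorem pv_group_eq (q : List (String × Int))
    (hq : List.Pairwise (fun a b => a.1 ≤ b.1) q) :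
    pvGroup q = (pvKeys q).map (fun k =>
      (k, [("tensors", ((q.filter (fun r => r.1 == k)).length : Int)),
           ("numel", ((q.filter (fun r => r.1 == k)).map (·.2)).sum)])) := by
  induction q using pvGroup.induct with
  | case1 => simp [pvGroup, pvKeys]
  | case2 p rest ih =>
    obtain ⟨htake, hdrop, hdpw⟩ := pv_run_facts p rest hq
    have hsplit : rest = rest.takeWhile (fun q => q.1 == p.1) ++ rest.dropWhile (fun q => q.1 == p.1) :=
      (List.takeWhile_append_dropWhile).symm
    rw [show pvKeys (p :: rest) = p.1 :: pvKeys (rest.dropWhile (fun q => q.1 == p.1)) from by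
      rw [pvKeys]]
    rw [show pvGroup (p :: rest) =
      (p.1, [("tensors", (1 + (rest.takeWhile (fun q => q.1 == p.1)).length : Int)),
             ("numel", p.2 + ((rest.takeWhile (fun q => q.1 == p.1)).map (·.2)).sum)])
        :: pvGroup (rest.dropWhile (fun q => q.1 == p.1)) from by rw [pvGroup]]
    rw [List.map_cons, ih hdpw]
    -- the head entry: filter over p :: rest at key p.1 is p :: run
    have hfilter_head : (p :: rest).filter (fun r => r.1 == p.1)
        = p :: rest.takeWhile (fun q => q.1 == p.1) := by
      rw [List.filter_cons]
      simp only [BEq.rfl, if_pos]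
      congr 1
      conv_lhs => rw [hsplit]
      rw [List.filter_append,
        List.filter_eq_self.mpr (fun a ha => by
          have h2 := List.mem_takeWhile_imp ha; simpa using h2),
        List.filter_eq_nil_iff.mpr (fun a ha => by
          simp only [beq_iff_eq]
          exact fun hh => absurd hh (ne_of_gt (hdrop a ha))), List.append_nil]
    congr 1
    · rw [hfilter_head]
      simp only [List.length_cons, List.map_cons, List.sum_cons, Prod.mk.injEq,
        List.cons.injEq, true_and, and_true]
      push_cast
      omega
    · -- tail entries: filter over p :: rest equals filter over the dropWhile remainder
      apply List.map_congr_left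
      intro k hk
      rcases List.mem_map.mp ((pv_keys_mem _ hdpw k).mp hk) with ⟨x, hx, rfl⟩
      have hklt : p.1 < x.1 := hdrop x hx
      have hfe : (p :: rest).filter (fun r => r.1 == x.1)
          = (rest.dropWhile (fun q => q.1 == p.1)).filter (fun r => r.1 == x.1) := by
        rw [List.filter_cons, if_neg (by simp only [beq_iff_eq]; exact ne_of_lt hklt)]
        conv_lhs => rw [hsplit]
        rw [List.filter_append, List.filter_eq_nil_iff.mpr (fun a ha => by
          simp only [beq_iff_eq]
          intro hh
          exact absurd (hh ▸ htake a ha) (ne_of_gt hklt)), List.nil_append]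
      rw [hfe]

-- ===== VERDICT (by name: the statement is the Claim_ definition above) =====
theorem summary_dtypes_py_spec : Claim_equal_summary_dtypes_py := by
  intro entries key hdom hpre
  unfold Spec_summary_dtypes_py
  simp only [summary_dtypes_py, summary_dtypes_py_alt]
  rw [pv_foldA_eq]
  have hQpw : List.Pairwise (fun a b : String × Int => a.1 ≤ b.1)
      (PySem.List.sorted (pvPairs entries key) (fun p => p.1)) :=
    PySem.List.sorted_pairwise (pvPairs entries key) (fun p => p.1)
  have hQperm : (PySem.List.sorted (pvPairs entries key) (fun p => p.1)).Perm (pvPairs entries key) :=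
    PySem.List.sorted_perm (pvPairs entries key) (fun p => p.1) false
  have hnd : (((pvPairs entries key).foldl pvStep PySem.Dict.empty).keys).Nodup :=
    PySem.Dict.nodup_keys_foldl_modify_key (pvPairs entries key) (fun p => p.1) pvInnerD0
      (fun _ p => pvIStep p.2) PySem.Dict.empty
      (by rw [PySem.Dict.keys_empty]; exact List.nodup_nil)
  have hkeys : ((pvPairs entries key).foldl pvStep PySem.Dict.empty).keys
      = PySem.Set.update ([] : PySem.Set String) ((pvPairs entries key).map (fun p => p.1)) := by
    have h := PySem.Dict.keys_foldl_modify_key (pvPairs entries key) (fun p => p.1) pvInnerD0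
      (fun _ p => pvIStep p.2) PySem.Dict.empty
    rw [PySem.Dict.keys_empty] at h
    exact h
  have hitems : ((pvPairs entries key).foldl pvStep PySem.Dict.empty).items
      = (((pvPairs entries key).foldl pvStep PySem.Dict.empty).keys).map
          (fun k => (k, ((pvPairs entries key).foldl pvStep PySem.Dict.empty).getD k pvInnerD0)) :=
    PySem.Dict.items_eq_map_keys _ hnd pvInnerD0
  have hgetD : ∀ k, ((pvPairs entries key).foldl pvStep PySem.Dict.empty).getD k pvInnerD0
      = pvInner (((pvPairs entries key).filter (fun p => p.1 == k)).length : Int)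
          ((((pvPairs entries key).filter (fun p => p.1 == k)).map (·.2)).sum) := by
    intro k
    rw [pv_getD_fold, PySem.Dict.getD_empty, pv_innerD0_eq, pv_inner_fold]
    simp only [zero_add]
  have hKnodup : (pvKeys (PySem.List.sorted (pvPairs entries key) (fun p => p.1))).Nodup :=
    (pv_keys_lt _ hQpw).imp (fun h => ne_of_lt h)
  have hKperm : (pvKeys (PySem.List.sorted (pvPairs entries key) (fun p => p.1))).Perm
      (((pvPairs entries key).foldl pvStep PySem.Dict.empty).keys) := by
    refine (List.perm_ext_iff_of_nodup hKnodup hnd).mpr (fun k => ?_)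
    rw [pv_keys_mem _ hQpw k, hkeys, PySem.Set.mem_update]
    simp only [List.not_mem_nil, false_or]
    exact (hQperm.map (fun p => p.1)).mem_iff
  have hsorted : PySem.List.sorted (((pvPairs entries key).foldl pvStep PySem.Dict.empty)).items (fun p => p.1)
      = (pvKeys (PySem.List.sorted (pvPairs entries key) (fun p => p.1))).map
          (fun k => (k, ((pvPairs entries key).foldl pvStep PySem.Dict.empty).getD k pvInnerD0)) := by
    apply PySem.List.sorted_eq_of_perm_of_pairwise_lt
    · rw [hitems]; exact hKperm.map _
    · rw [List.pairwise_map]; exact pv_keys_lt _ hQpw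
  rw [hsorted, List.map_map, pv_group_eq _ hQpw]
  apply List.map_congr_left
  intro k hk
  have hflt : ((PySem.List.sorted (pvPairs entries key) (fun p => p.1)).filter (fun r => r.1 == k)).Perm
      ((pvPairs entries key).filter (fun r => r.1 == k)) := hQperm.filter _
  simp only [Function.comp_apply]
  rw [hgetD k, ← hflt.length_eq, ← (hflt.map (fun x => x.2)).sum_eq]
  rfl
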